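-- pv_equiv track=rewrite | github.com/aulb/notes | matrix/SumAroundRadius-nonlc.py | sumAroundRadius
-- ===== SOURCE A (Python) =====
-- from typing import List
--
-- def sumAroundRadius(matrix: List[int], radius: int) -> List[int]:
--   if not matrix or not matrix[0]: return []
--   m = len(matrix) # row
--   n = len(matrix[0]) # col
--   result = [[0 for j in range(n)] for i in range(m)]
--
--   for i in range(m):
--     for j in range(n):
--       result[i][j] = getSumAroundCoordinate(matrix, m, n, radius, i, j)
--   return result
--
-- def getSumAroundCoordinate(matrix: List[int], m: int, n: int, radius: int, i: int, j: int) -> int: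
--   total = 0
--   for x in range(i - radius, i + radius + 1):
--     for y in range(j - radius, j + radius + 1):
--       if isValidCoordinate(m, n, x, y):
--         total += matrix[x][y]
--   return total
--
-- def isValidCoordinate(m: int, n: int, x:int, y: int) -> bool:
--   return x >= 0 and y >= 0 and x < m and y < n
-- ===== SOURCE B (Python) =====
-- from typing import List
--
-- def sumAroundRadius(matrix: List[int], radius: int) -> List[int]:
--   # Separable O(m*n) sliding windows via 1D prefix sums: one horizontal pass
--   # (clamped row-window sums from per-row prefixes), then one vertical pass
--   # (clamped column-window sums from a column-wise prefix of the first pass).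
--   if not matrix or not matrix[0]: return []
--   m, n = len(matrix), len(matrix[0])
--   hwin = [_rowWindows(row, radius, n) for row in matrix]
--   # q[k][j] = sum of hwin[x][j] for x < k
--   q = [[0] * n]
--   last = [0] * n
--   for row in hwin:
--     last = [a + b for a, b in zip(last, row)]
--     q.append(last)
--   def vwin(i):
--     lo, hi = max(i - radius, 0), min(i + radius + 1, m)
--     if lo < hi:
--       return [q[hi][j] - q[lo][j] for j in range(n)]
--     return [0] * n
--   return [vwin(i) for i in range(m)]
--
-- def _rowWindows(row, radius, n):
--   # p[k] = sum of row[0:k] for k <= n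
--   p = [0]
--   acc = 0
--   for x in row[:n]:
--     acc += x
--     p.append(acc)
--   def w(j):
--     lo, hi = max(j - radius, 0), min(j + radius + 1, n)
--     return p[hi] - p[lo] if lo < hi else 0
--   return [w(j) for j in range(n)]
-- ===== Notes on version B (the rewrite author's own statement) =====
-- stated objective: faster
-- what changed: Replaced the per-cell O(r^2) rescan of the window with two separable O(m*n) sliding-window passes built from 1D prefix sums (row prefixes, then a column-wise prefix of the row-window sums), answering each cell with two O(1) prefix differences.
import Mathlib
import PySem

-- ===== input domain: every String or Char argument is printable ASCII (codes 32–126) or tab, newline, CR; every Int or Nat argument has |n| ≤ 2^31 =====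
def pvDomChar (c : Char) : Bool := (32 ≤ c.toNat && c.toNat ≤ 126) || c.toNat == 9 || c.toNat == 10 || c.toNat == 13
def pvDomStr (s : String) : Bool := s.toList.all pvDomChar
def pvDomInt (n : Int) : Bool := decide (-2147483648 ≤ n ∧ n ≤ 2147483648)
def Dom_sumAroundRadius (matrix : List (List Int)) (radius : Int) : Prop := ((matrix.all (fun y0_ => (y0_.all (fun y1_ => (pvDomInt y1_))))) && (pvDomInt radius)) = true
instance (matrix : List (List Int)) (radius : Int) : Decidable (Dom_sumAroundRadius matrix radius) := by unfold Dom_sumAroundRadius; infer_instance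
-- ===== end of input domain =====

-- B replaces A's per-cell O(r^2) window rescan by two separable sliding-window
-- passes built from 1D prefix sums (objective: faster, O(m*n) total).

-- ===== PORT A =====
def isValidCoordinate (m n x y : Int) : Bool :=
  decide (x ≥ 0) && decide (y ≥ 0) && decide (x < m) && decide (y < n)

def getSumAroundCoordinate (matrix : List (List Int)) (m n radius i j : Int) : Int :=
  (PySem.List.pyRange (i - radius) (i + radius + 1)).foldl (fun total x =>
    (PySem.List.pyRange (j - radius) (j + radius + 1)).foldl (fun total y =>
      if isValidCoordinate m n x y then
        total + PySem.List.pyGetD (PySem.List.pyGetD matrix x []) y 0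
      else total) total) 0

def sumAroundRadius (matrix : List (List Int)) (radius : Int) : List (List Int) :=
  match matrix with
  | [] => []
  | r0 :: _ =>
    if r0 = [] then [] else
    let m : Int := matrix.length
    let n : Int := r0.length
    (PySem.List.pyRange 0 m).map (fun i =>
      (PySem.List.pyRange 0 n).map (fun j =>
        getSumAroundCoordinate matrix m n radius i j))

-- ===== PORT B =====
-- _rowWindows in Source B: 1D prefix p of row[:n], then one clamped window per column
def rowWindows (row : List Int) (radius n : Int) : List Int :=
  let pa := (row.take n.toNat).foldl
    (fun (s : List Int × Int) x => (s.1 ++ [s.2 + x], s.2 + x)) ([0], 0)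
  (PySem.List.pyRange 0 n).map (fun j =>
    let lo := max (j - radius) 0
    let hi := min (j + radius + 1) n
    if lo < hi then PySem.List.pyGetD pa.1 hi 0 - PySem.List.pyGetD pa.1 lo 0 else 0)

def sumAroundRadius_alt (matrix : List (List Int)) (radius : Int) : List (List Int) :=
  match matrix with
  | [] => []
  | r0 :: _ =>
    if r0 = [] then [] else
    let m : Int := matrix.length
    let n : Int := r0.length
    let hwin := matrix.map (fun row => rowWindows row radius n)
    -- column-wise prefix q: q[k][j] = sum of hwin[x][j] for x < k
    let ql := hwin.foldl
      (fun (s : List (List Int) × List Int) row =>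
        let nv := (s.2.zip row).map (fun ab => ab.1 + ab.2)
        (s.1 ++ [nv], nv))
      ([List.replicate n.toNat 0], List.replicate n.toNat 0)
    (PySem.List.pyRange 0 m).map (fun i =>
      let lo := max (i - radius) 0
      let hi := min (i + radius + 1) m
      if lo < hi then
        (PySem.List.pyRange 0 n).map (fun j =>
          PySem.List.pyGetD (PySem.List.pyGetD ql.1 hi []) j 0 -
          PySem.List.pyGetD (PySem.List.pyGetD ql.1 lo []) j 0)
      else List.replicate n.toNat 0)

-- ===== PRECONDITION & SPEC =====
-- Pre_ excludes exactly the inputs on which BOTH Pythons raise IndexError: a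
-- later row shorter than the first row together with radius ≥ 0 (for radius < 0
-- neither program ever indexes a row, both return the all-zero matrix, and such
-- inputs stay inside Pre_).
def Pre_sumAroundRadius (matrix : List (List Int)) (radius : Int) : Prop :=
  radius < 0 ∨ ∀ row ∈ matrix, (matrix.headD []).length ≤ row.length
instance (matrix : List (List Int)) (radius : Int) : Decidable (Pre_sumAroundRadius matrix radius) := by
  unfold Pre_sumAroundRadius; infer_instance

def pvWitness_sumAroundRadius : List (List Int) × Int := ([[1, 2], [3, 4]], 1)

def Spec_sumAroundRadius (matrix : List (List Int)) (radius : Int) (out : List (List Int)) : Prop := out = sumAroundRadius_alt matrix radius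
instance (matrix : List (List Int)) (radius : Int) (out : List (List Int)) : Decidable (Spec_sumAroundRadius matrix radius out) := by unfold Spec_sumAroundRadius; infer_instance

-- ===== CLAIM (what is proved, stated in full; the proofs are below) =====
def Claim_equal_sumAroundRadius : Prop := ∀ (matrix : List (List Int)) (radius : Int), Dom_sumAroundRadius matrix radius → Pre_sumAroundRadius matrix radius → Spec_sumAroundRadius matrix radius (sumAroundRadius matrix radius)

-- ===== LEMMAS AND PROOFS =====

-- fold with a guarded add is init + sum of guarded terms
lemma foldl_if_add {α : Type} (L : List α) (c : α → Bool) (f : α → Int) (t0 : Int) :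
    L.foldl (fun t y => if c y then t + f y else t) t0
      = t0 + (L.map (fun y => if c y then f y else 0)).sum := by
  have h : (fun (t : Int) y => if c y then t + f y else t)
      = (fun t y => t + (if c y then f y else 0)) := by
    funext t y; by_cases h : c y <;> simp [h]
  rw [h, PySem.List.foldl_add]

-- summing a 0/1-guarded term over range(a,b) is summing over the clamped range
lemma sum_ite_range (f : Int → Int) (n : Int) : ∀ (k : Nat) (a b : Int), (b - a).toNat = k →
    ((PySem.List.pyRange a b).map (fun y => if 0 ≤ y ∧ y < n then f y else 0)).sum
      = ((PySem.List.pyRange (max a 0) (min b n)).map f).sum := by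
  intro k
  induction k with
  | zero =>
    intro a b hk
    have hba : b ≤ a := by omega
    rw [PySem.List.pyRange_one_eq_nil hba, PySem.List.pyRange_one_eq_nil (by omega : min b n ≤ max a 0)]
    simp
  | succ k ih =>
    intro a b hk
    by_cases hab : a < b
    · rw [PySem.List.pyRange_one_cons hab]
      rw [List.map_cons, List.sum_cons, ih (a+1) b (by omega)]
      by_cases hv : 0 ≤ a ∧ a < n
      · have h1 : max a 0 = a := by omega
        have h2 : max (a+1) 0 = a + 1 := by omega
        have h3 : a < min b n := by omega
        rw [if_pos hv, h1, h2, PySem.List.pyRange_one_cons h3, List.map_cons, List.sum_cons]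
      · rw [if_neg hv, zero_add]
        rcases (by omega : a < 0 ∨ n ≤ a) with h | h
        · have : max (a+1) 0 = max a 0 := by omega
          rw [this]
        · rw [PySem.List.pyRange_one_eq_nil (by omega : min b n ≤ max (a+1) 0),
              PySem.List.pyRange_one_eq_nil (by omega : min b n ≤ max a 0)]
    · rw [PySem.List.pyRange_one_eq_nil (by omega : b ≤ a), PySem.List.pyRange_one_eq_nil (by omega : min b n ≤ max a 0)]
      simp

lemma sum_ite_range' (f : Int → Int) (n a b : Int) :
    ((PySem.List.pyRange a b).map (fun y => if 0 ≤ y ∧ y < n then f y else 0)).sum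
      = ((PySem.List.pyRange (max a 0) (min b n)).map f).sum :=
  sum_ite_range f n (b - a).toNat a b rfl

-- sum of entries over range(a,b) is a difference of prefix sums
lemma sum_pyRange_getD (l : List Int) : ∀ (k : Nat) (a b : Int), (b - a).toNat = k →
    0 ≤ a → a ≤ b → b ≤ (l.length : Int) →
    ((PySem.List.pyRange a b).map (fun y => PySem.List.pyGetD l y 0)).sum
      = (l.take b.toNat).sum - (l.take a.toNat).sum := by
  intro k
  induction k with
  | zero =>
    intro a b hk h0 hab hb
    have : a = b := by omega
    subst this
    rw [PySem.List.pyRange_one_eq_nil le_rfl]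
    simp
  | succ k ih =>
    intro a b hk h0 hab hb
    have hlt : a < b := by omega
    have hstep : PySem.List.pyRange a b = PySem.List.pyRange a (b - 1) ++ [b - 1] := by
      have := PySem.List.pyRange_one_succ_right (a := a) (b := b - 1) (by omega)
      simpa using this
    rw [hstep, List.map_append, List.sum_append, ih a (b-1) (by omega) h0 (by omega) (by omega)]
    have hget : PySem.List.pyGetD l (b - 1) 0 = l[(b-1).toNat]'(by omega) := by
      exact PySem.List.pyGetD_eq_getElem l 0 (by omega) (by omega)
    have hbn : b.toNat = (b-1).toNat + 1 := by omega
    rw [hbn, List.sum_take_succ l ((b-1).toNat) (by omega)]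
    simp [hget]
    ring

lemma sum_pyRange_getD' (l : List Int) (a b : Int) (h0 : 0 ≤ a) (hab : a ≤ b) (hb : b ≤ (l.length : Int)) :
    ((PySem.List.pyRange a b).map (fun y => PySem.List.pyGetD l y 0)).sum
      = (l.take b.toNat).sum - (l.take a.toNat).sum :=
  sum_pyRange_getD l (b - a).toNat a b rfl h0 hab hb

lemma isValid_iff (m n x y : Int) :
    isValidCoordinate m n x y = true ↔ (0 ≤ x ∧ x < m) ∧ (0 ≤ y ∧ y < n) := by
  simp [isValidCoordinate, ge_iff_le]
  tauto

-- A's per-cell helper as a double sum over the clamped window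
lemma getSum_eq (matrix : List (List Int)) (n radius i j : Int) :
    getSumAroundCoordinate matrix (matrix.length : Int) n radius i j
      = ((PySem.List.pyRange (max (i - radius) 0) (min (i + radius + 1) (matrix.length : Int))).map (fun x =>
          ((PySem.List.pyRange (max (j - radius) 0) (min (j + radius + 1) n)).map (fun y =>
            PySem.List.pyGetD (PySem.List.pyGetD matrix x []) y 0)).sum)).sum := by
  unfold getSumAroundCoordinate
  have hfun : (fun (total : Int) x =>
      (PySem.List.pyRange (j - radius) (j + radius + 1)).foldl
        (fun total y => if isValidCoordinate (matrix.length : Int) n x y then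
          total + PySem.List.pyGetD (PySem.List.pyGetD matrix x []) y 0 else total) total)
      = fun total x => total + ((PySem.List.pyRange (j - radius) (j + radius + 1)).map
          (fun y => if isValidCoordinate (matrix.length : Int) n x y then
            PySem.List.pyGetD (PySem.List.pyGetD matrix x []) y 0 else 0)).sum := by
    funext t x; exact foldl_if_add _ _ _ _
  rw [hfun, PySem.List.foldl_add, zero_add]
  have hpt : ∀ x : Int, ((PySem.List.pyRange (j - radius) (j + radius + 1)).map
        (fun y => if isValidCoordinate (matrix.length : Int) n x y then
          PySem.List.pyGetD (PySem.List.pyGetD matrix x []) y 0 else 0)).sum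
      = (if 0 ≤ x ∧ x < (matrix.length : Int) then
          ((PySem.List.pyRange (max (j - radius) 0) (min (j + radius + 1) n)).map
            (fun y => PySem.List.pyGetD (PySem.List.pyGetD matrix x []) y 0)).sum else 0) := by
    intro x
    by_cases hx : 0 ≤ x ∧ x < (matrix.length : Int)
    · rw [if_pos hx, ← sum_ite_range' (fun y => PySem.List.pyGetD (PySem.List.pyGetD matrix x []) y 0) n (j - radius) (j + radius + 1)]
      congr 1
      apply List.map_congr_left
      intro y _
      by_cases hy : 0 ≤ y ∧ y < n
      · rw [if_pos ((isValid_iff _ _ _ _).mpr ⟨hx, hy⟩), if_pos hy]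
      · rw [if_neg (by rw [isValid_iff]; tauto), if_neg hy]
    · rw [if_neg hx]
      have hz : (PySem.List.pyRange (j - radius) (j + radius + 1)).map
          (fun y => if isValidCoordinate (matrix.length : Int) n x y then
            PySem.List.pyGetD (PySem.List.pyGetD matrix x []) y 0 else 0)
          = (PySem.List.pyRange (j - radius) (j + radius + 1)).map (fun _ => (0:Int)) := by
        apply List.map_congr_left
        intro y _
        rw [if_neg (by rw [isValid_iff]; tauto)]
      rw [hz]
      simp
  rw [show (fun x => ((PySem.List.pyRange (j - radius) (j + radius + 1)).map
        (fun y => if isValidCoordinate (matrix.length : Int) n x y then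
          PySem.List.pyGetD (PySem.List.pyGetD matrix x []) y 0 else 0)).sum)
      = (fun x => if 0 ≤ x ∧ x < (matrix.length : Int) then
          ((PySem.List.pyRange (max (j - radius) 0) (min (j + radius + 1) n)).map
            (fun y => PySem.List.pyGetD (PySem.List.pyGetD matrix x []) y 0)).sum else 0)
    from funext hpt]
  rw [sum_ite_range']

-- the prefix-building fold of rowWindows, in closed form
lemma prefix_fold (l : List Int) : ∀ (p0 : List Int) (acc : Int),
    l.foldl (fun (s : List Int × Int) x => (s.1 ++ [s.2 + x], s.2 + x)) (p0, acc)
      = (p0 ++ (List.range l.length).map (fun k => acc + (l.take (k + 1)).sum), acc + l.sum) := by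
  induction l with
  | nil => intro p0 acc; simp
  | cons x t ih =>
    intro p0 acc
    rw [List.foldl_cons, ih]
    simp only [Prod.mk.injEq]
    constructor
    · rw [List.length_cons, List.range_succ_eq_map, List.map_cons, List.map_map]
      simp [Function.comp, List.append_assoc, add_assoc]
    · simp [add_assoc]

lemma prefix_getD (l : List Int) (k : Int) (h0 : 0 ≤ k) (hk : k ≤ (l.length : Int)) :
    PySem.List.pyGetD (0 :: (List.range l.length).map (fun k => (l.take (k + 1)).sum)) k 0
      = (l.take k.toNat).sum := by
  rw [PySem.List.pyGetD_of_nonneg _ _ h0]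
  rcases hnk : k.toNat with _ | j
  · simp
  · rw [List.getD_cons_succ]
    have hj : j < l.length := by omega
    rw [List.getD_eq_getElem _ _ (by simpa using hj)]
    rw [List.getElem_map, List.getElem_range]

-- column partial sums of the horizontal pass
def colAcc (hw : List (List Int)) (k : Nat) (j : Nat) : Int :=
  ((hw.take k).map (fun r => r.getD j 0)).sum

lemma colAcc_cons (r : List Int) (t : List (List Int)) (k j : Nat) :
    colAcc (r :: t) (k + 1) j = r.getD j 0 + colAcc t k j := by
  simp [colAcc]

lemma colAcc_take (hw : List (List Int)) (k jn : Nat) :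
    colAcc hw k jn = ((hw.map (fun r => r.getD jn 0)).take k).sum := by
  simp [colAcc, List.map_take]

lemma zip_add_eq (last r : List Int) (n : Nat) (hl : last.length = n) (hr : r.length = n) :
    (last.zip r).map (fun ab => ab.1 + ab.2)
      = (List.range n).map (fun j => last.getD j 0 + r.getD j 0) := by
  apply List.ext_getElem
  · simp [hl, hr]
  · intro i h1 h2
    simp [hl, hr] at h1
    simp [List.getElem_zip, List.getD_eq_getElem?_getD, hl, hr, h1]

-- the column-prefix fold of sumAroundRadius_alt, in closed form
lemma vfold (n : Nat) : ∀ (hw : List (List Int)) (q0 : List (List Int)) (last : List Int),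
    (∀ r ∈ hw, r.length = n) → last.length = n →
    (hw.foldl
        (fun (s : List (List Int) × List Int) row =>
          let nv := (s.2.zip row).map (fun ab => ab.1 + ab.2)
          (s.1 ++ [nv], nv)) (q0, last)).1
      = q0 ++ (List.range hw.length).map (fun k =>
          (List.range n).map (fun j => last.getD j 0 + colAcc hw (k + 1) j)) := by
  intro hw
  induction hw with
  | nil => intro q0 last _ _; simp
  | cons r t ih =>
    intro q0 last hrows hl
    have hr : r.length = n := hrows r (by simp)
    have hnv : ((last.zip r).map (fun ab => ab.1 + ab.2))
        = (List.range n).map (fun j => last.getD j 0 + r.getD j 0) :=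
      zip_add_eq last r n hl hr
    have hnvlen : ((last.zip r).map (fun ab => ab.1 + ab.2)).length = n := by
      simp [hl, hr]
    rw [List.foldl_cons]
    simp only []
    rw [ih (q0 ++ [(last.zip r).map (fun ab => ab.1 + ab.2)])
        ((last.zip r).map (fun ab => ab.1 + ab.2))
        (fun r' hr' => hrows r' (by simp [hr'])) hnvlen]
    rw [List.length_cons, List.range_succ_eq_map, List.map_cons, List.map_map]
    rw [List.append_assoc]
    congr 1
    rw [List.singleton_append]
    congr 1
    · rw [hnv]
      apply List.map_congr_left
      intro j hj
      simp only [List.mem_range] at hj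
      rw [colAcc_cons]
      simp [colAcc]
    · apply List.map_congr_left
      intro k hk
      simp only [Function.comp]
      apply List.map_congr_left
      intro j hj
      simp only [List.mem_range] at hj
      rw [colAcc_cons]
      have : ((last.zip r).map (fun ab => ab.1 + ab.2)).getD j 0
          = last.getD j 0 + r.getD j 0 := by
        rw [hnv]
        rw [List.getD_eq_getElem _ _ (by simpa using hj)]
        simp
      rw [this]
      ring

lemma getD_replicate0 (nn j : Nat) : (List.replicate nn (0:Int)).getD j 0 = 0 := by
  rcases Nat.lt_or_ge j nn with h | h
  · rw [List.getD_eq_getElem _ _ (by simpa using h)]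
    simp
  · rw [List.getD_eq_default _ _ (by simpa using h)]

-- entries of the column-prefix list q
lemma q_at (hw : List (List Int)) (nn : Nat) (hrows : ∀ r ∈ hw, r.length = nn)
    (k : Int) (h0 : 0 ≤ k) (hk : k ≤ (hw.length : Int)) :
    PySem.List.pyGetD ((hw.foldl
        (fun (s : List (List Int) × List Int) row =>
          let nv := (s.2.zip row).map (fun ab => ab.1 + ab.2)
          (s.1 ++ [nv], nv)) ([List.replicate nn 0], List.replicate nn 0)).1) k []
      = (List.range nn).map (fun j => colAcc hw k.toNat j) := by
  rw [vfold nn hw _ _ hrows (by simp)]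
  simp only [getD_replicate0, zero_add, List.singleton_append]
  rw [PySem.List.pyGetD_of_nonneg _ _ h0]
  rcases hnk : k.toNat with _ | j2
  · rw [List.getD_cons_zero]
    rw [show (fun j => colAcc hw 0 j) = (fun _ => (0:Int)) from funext (fun j => by simp [colAcc])]
    rw [List.map_const']
    simp
  · rw [List.getD_cons_succ]
    have hj : j2 < hw.length := by omega
    rw [List.getD_eq_getElem _ _ (by simpa using hj)]
    rw [List.getElem_map, List.getElem_range]

-- entry of a map over List.range at an Int index
lemma v_at (nn : Nat) (F : Nat → Int) (j : Int) (h0 : 0 ≤ j) (hj : j < (nn : Int)) :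
    PySem.List.pyGetD ((List.range nn).map F) j 0 = F j.toNat := by
  rw [PySem.List.pyGetD_of_nonneg _ _ h0]
  rw [List.getD_eq_getElem _ _ (by simp; omega)]
  rw [List.getElem_map, List.getElem_range]

lemma map_const_pyRange (n : Int) :
    (PySem.List.pyRange 0 n).map (fun _ => (0:Int)) = List.replicate n.toNat 0 := by
  rw [List.map_const', PySem.List.length_pyRange_one]
  norm_num

-- entries of the horizontal pass: the clamped row-window sum
lemma rowWindows_at (row : List Int) (radius n j : Int) (hn : n ≤ (row.length : Int)) (hn0 : 0 ≤ n)
    (h0 : 0 ≤ j) (hj : j < n) :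
    (rowWindows row radius n).getD j.toNat 0
      = ((PySem.List.pyRange (max (j - radius) 0) (min (j + radius + 1) n)).map
          (fun y => PySem.List.pyGetD row y 0)).sum := by
  have hlen : ((row.take n.toNat).length : Int) = n := by
    simp; omega
  simp only [rowWindows]
  rw [List.getD_eq_getElem _ _ (by simp [PySem.List.length_pyRange_one]; omega)]
  rw [List.getElem_map, PySem.List.getElem_pyRange_one]
  rw [zero_add, Int.toNat_of_nonneg h0]
  rw [prefix_fold]
  simp only [List.singleton_append, zero_add]
  by_cases hjw : max (j - radius) 0 < min (j + radius + 1) n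
  · rw [if_pos hjw]
    rw [prefix_getD _ _ (by omega) (by omega)]
    rw [prefix_getD _ _ (by omega) (by omega)]
    rw [← sum_pyRange_getD' (row.take n.toNat) _ _ (by omega) (by omega) (by omega)]
    apply congrArg List.sum
    apply List.map_congr_left
    intro y hy
    rw [PySem.List.mem_pyRange_one] at hy
    have hy0 : 0 ≤ y := by omega
    have hyn : y < n := by omega
    rw [PySem.List.pyGetD_eq_getElem _ _ hy0 (by omega)]
    rw [PySem.List.pyGetD_eq_getElem _ _ hy0 (by omega)]
    exact List.getElem_take
  · rw [if_neg hjw]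
    rw [PySem.List.pyRange_one_eq_nil (by omega)]
    simp

-- ===== VERDICT (by name: the statement is the Claim_ definition above) =====
set_option maxHeartbeats 1000000 in
theorem sumAroundRadius_spec : Claim_equal_sumAroundRadius := by
  intro matrix radius _hdom hpre
  unfold Spec_sumAroundRadius
  cases matrix with
  | nil => rfl
  | cons r0 rest =>
    by_cases h0 : r0 = []
    · simp [sumAroundRadius, sumAroundRadius_alt, h0]
    · simp only [sumAroundRadius, sumAroundRadius_alt, if_neg h0, Int.toNat_natCast]
      apply List.map_congr_left
      intro i hi
      rw [PySem.List.mem_pyRange_one] at hi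
      have hlo0 : (0:Int) ≤ max (i - radius) 0 := le_max_right _ _
      have hhi2 : min (i + radius + 1) ((r0 :: rest).length : Int) ≤ ((r0 :: rest).length : Int) :=
        min_le_right _ _
      by_cases hlh : max (i - radius) 0 < min (i + radius + 1) ((r0 :: rest).length : Int)
      · rw [if_pos hlh]
        have hrect : ∀ row ∈ (r0 :: rest), r0.length ≤ row.length := by
          rcases hpre with hr | hr
          · exfalso
            have h1 : i - radius ≤ max (i - radius) 0 := le_max_left _ _
            have h2 : min (i + radius + 1) ((r0 :: rest).length : Int) ≤ i + radius + 1 :=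
              min_le_left _ _
            omega
          · simpa using hr
        have hrows : ∀ r ∈ (r0 :: rest).map (fun row => rowWindows row radius (r0.length : Int)),
            r.length = r0.length := by
          intro r hr
          rcases List.mem_map.mp hr with ⟨row, _, hrw⟩
          rw [← hrw]
          simp [rowWindows, PySem.List.length_pyRange_one]
        apply List.map_congr_left
        intro j hj
        rw [PySem.List.mem_pyRange_one] at hj
        rw [getSum_eq]
        rw [q_at _ r0.length hrows _ (by omega) (by simpa using hhi2)]
        rw [q_at _ r0.length hrows _ hlo0 (by simp only [List.length_map]; omega)]
        rw [v_at r0.length _ j hj.1 (by simpa using hj.2)]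
        rw [v_at r0.length _ j hj.1 (by simpa using hj.2)]
        rw [colAcc_take, colAcc_take]
        rw [← sum_pyRange_getD' (((r0 :: rest).map (fun row => rowWindows row radius (r0.length : Int))).map
              (fun r => r.getD j.toNat 0)) _ _ hlo0 (le_of_lt hlh) (by simpa using hhi2)]
        apply congrArg List.sum
        apply List.map_congr_left
        intro x hx
        rw [PySem.List.mem_pyRange_one] at hx
        have hx0 : 0 ≤ x := by omega
        have hxm : x < ((r0 :: rest).length : Int) := by omega
        rw [PySem.List.pyGetD_eq_getElem (((r0 :: rest).map (fun row => rowWindows row radius (r0.length : Int))).map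
              (fun r => r.getD j.toNat 0)) 0 hx0 (by simp only [List.length_map]; omega)]
        rw [List.getElem_map, List.getElem_map]
        have hmem : (r0 :: rest)[x.toNat]'(by omega) ∈ (r0 :: rest) := List.getElem_mem _
        rw [rowWindows_at _ _ _ _ (by exact_mod_cast hrect _ hmem) (by positivity) hj.1 hj.2]
        apply congrArg List.sum
        apply List.map_congr_left
        intro y hy
        rw [PySem.List.mem_pyRange_one] at hy
        rw [PySem.List.pyGetD_eq_getElem (r0 :: rest) [] hx0 (by omega)]
      · rw [if_neg hlh]
        have hz : ∀ j ∈ PySem.List.pyRange 0 (r0.length : Int),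
            getSumAroundCoordinate (r0 :: rest) ((r0 :: rest).length : Int) (r0.length : Int) radius i j
              = 0 := by
          intro j _
          rw [getSum_eq, PySem.List.pyRange_one_eq_nil (by omega)]
          simp
        exact (List.map_congr_left hz).trans (map_const_pyRange _)
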